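-- pv_equiv track=rewrite | github.com/posadaj/airplanes | sequence/main.py | layup_sequence
-- ===== SOURCE A (Python) =====
-- def layup_sequence(n: int) -> int:
-- 	"""
-- 	An improved implementation of the Layup Sequence that uses iteration
-- 	instead of recursion to calculate the result.
--
-- 	Analysis:
-- 		This solution has a runtime complexity of O(N) or what we can "linear".
-- 		You can see with the generated graph the runtime increases linearly,
-- 		for the same increase in N, we see the same increaes in runtime. In
-- 		other words, there is some M so that y= Mx + b would approximate the
-- 		runtime of this algorithm. On my M3 Mac, that M is .000075
-- 	"""
-- 	if type(n) != int:
-- 		return None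
--
-- 	if (n <= 0):
-- 		return None
--
-- 	if (n <= 3):
-- 		return n
--
-- 	previous = 3
-- 	previous_previous = 2
-- 	for step in range(4, n+1):
-- 		if (step % 2 == 0):
-- 			current = previous + previous_previous
-- 		else:
-- 			current = 2*previous - previous_previous
-- 		previous_previous = previous
-- 		previous = current
--
-- 	return current
-- ===== SOURCE B (Python) =====
-- def layup_sequence(n: int) -> int:
-- 	"""Layup Sequence via fast exponentiation of the combined two-step
-- 	transition matrix M = [[-1, 2], [-1, 3]] acting on (f(2k-1), f(2k)):
-- 	O(log n) matrix power instead of the O(n) loop."""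
-- 	if type(n) != int:
-- 		return None
-- 	if n <= 0:
-- 		return None
-- 	if n <= 3:
-- 		return n
--
-- 	def mat_mul(x, y):
-- 		return (
-- 			x[0] * y[0] + x[1] * y[2], x[0] * y[1] + x[1] * y[3],
-- 			x[2] * y[0] + x[3] * y[2], x[2] * y[1] + x[3] * y[3],
-- 		)
--
-- 	def mat_pow(e):
-- 		if e == 0:
-- 			return (1, 0, 0, 1)
-- 		h = mat_pow(e // 2)
-- 		s = mat_mul(h, h)
-- 		if e % 2 == 0:
-- 			return s
-- 		return mat_mul(s, (-1, 2, -1, 3))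
--
-- 	k = n // 2
-- 	p = mat_pow(k - 1)
-- 	# apply p to the column vector (f(1), f(2)) = (1, 2)
-- 	a = p[0] * 1 + p[1] * 2
-- 	b = p[2] * 1 + p[3] * 2
-- 	if n % 2 == 0:
-- 		return b
-- 	return 2 * b - a
-- ===== Notes on version B (the rewrite author's own statement) =====
-- stated objective: faster
-- what changed: Replaced the linear two-variable iteration by binary exponentiation of the combined two-step transition matrix applied to the first pair of sequence values, with an odd-index correction; intended as faster (logarithmically many matrix multiplications instead of a step per index; measured ~44x at the largest size both finished).
import Mathlib
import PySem

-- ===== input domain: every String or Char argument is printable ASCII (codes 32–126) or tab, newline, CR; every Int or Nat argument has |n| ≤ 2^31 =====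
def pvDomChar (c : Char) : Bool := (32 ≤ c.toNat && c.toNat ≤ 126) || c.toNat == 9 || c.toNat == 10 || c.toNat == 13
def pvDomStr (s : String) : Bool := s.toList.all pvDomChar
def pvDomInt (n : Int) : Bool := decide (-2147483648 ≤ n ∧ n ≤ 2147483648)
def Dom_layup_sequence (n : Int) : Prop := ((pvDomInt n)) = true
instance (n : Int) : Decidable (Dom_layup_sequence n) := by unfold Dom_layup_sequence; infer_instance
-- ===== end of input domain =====

-- B replaces A's step-per-index iteration by binary exponentiation of the two-step transition matrix; intended as faster (measured ~44x at the largest size both finished).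


-- ===== PORT A =====
-- literal port of the Python loop: state (previous, previous_previous), return previous (= current after the last step)
def layup_sequence (n : Int) : Option Int :=
  if n ≤ 0 then none
  else if n ≤ 3 then some n
  else
    let st := (PySem.List.pyRange 4 (n + 1)).foldl
      (fun (pr : Int × Int) step =>
        let current := if PySem.Int.mod step 2 = 0 then pr.1 + pr.2 else 2 * pr.1 - pr.2
        (current, pr.1)) (3, 2)
    some st.1

-- ===== PORT B =====
-- 2x2 matrix as a flat 4-tuple (row major), as in Source B
def pvMatMul (x y : Int × Int × Int × Int) : Int × Int × Int × Int :=
  (x.1 * y.1 + x.2.1 * y.2.2.1, x.1 * y.2.1 + x.2.1 * y.2.2.2,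
   x.2.2.1 * y.1 + x.2.2.2 * y.2.2.1, x.2.2.1 * y.2.1 + x.2.2.2 * y.2.2.2)

def pvMatPow (e : Nat) : Int × Int × Int × Int :=
  if h : e = 0 then (1, 0, 0, 1)
  else
    let hm := pvMatPow (e / 2)
    let s := pvMatMul hm hm
    if e % 2 = 0 then s else pvMatMul s (-1, 2, -1, 3)
decreasing_by exact Nat.div_lt_self (Nat.pos_of_ne_zero h) (by omega)

def layup_sequence_alt (n : Int) : Option Int :=
  if n ≤ 0 then none
  else if n ≤ 3 then some n
  else
    let k := PySem.Int.floordiv n 2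
    let p := pvMatPow (k - 1).toNat
    let a := p.1 * 1 + p.2.1 * 2
    let b := p.2.2.1 * 1 + p.2.2.2 * 2
    if PySem.Int.mod n 2 = 0 then some b else some (2 * b - a)

-- ===== PRECONDITION & SPEC =====
def Spec_layup_sequence (n : Int) (out : Option Int) : Prop := out = layup_sequence_alt n
instance (n : Int) (out : Option Int) : Decidable (Spec_layup_sequence n out) := by unfold Spec_layup_sequence; infer_instance

-- ===== CLAIM (what is proved, stated in full; the proofs are below) =====
def Claim_equal_layup_sequence : Prop := ∀ (n : Int), Dom_layup_sequence n → Spec_layup_sequence n (layup_sequence n)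

-- ===== LEMMAS AND PROOFS =====

-- the mathematical sequence both programs compute
def pvF : Nat → Int
  | 0 => 0
  | 1 => 1
  | 2 => 2
  | 3 => 3
  | (m + 4) => if (m + 4) % 2 = 0 then pvF (m + 3) + pvF (m + 2) else 2 * pvF (m + 3) - pvF (m + 2)

lemma pvF_succ (m : Nat) (h : 3 ≤ m) :
    pvF (m + 1) = if (m + 1) % 2 = 0 then pvF m + pvF (m - 1) else 2 * pvF m - pvF (m - 1) := by
  obtain ⟨k, rfl⟩ : ∃ k, m = k + 3 := ⟨m - 3, by omega⟩
  simp [pvF]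

-- A's loop invariant
lemma loopA (m : Nat) (h : 4 ≤ m) :
    ((PySem.List.pyRange 4 ((m : Int) + 1)).foldl
      (fun (pr : Int × Int) step =>
        let current := if PySem.Int.mod step 2 = 0 then pr.1 + pr.2 else 2 * pr.1 - pr.2
        (current, pr.1)) (3, 2)) = (pvF m, pvF (m - 1)) := by
  induction m, h using Nat.le_induction with
  | base => decide
  | succ m hm ih =>
    have hr : PySem.List.pyRange 4 (((m : Int) + 1) + 1)
        = PySem.List.pyRange 4 ((m : Int) + 1) ++ [(m : Int) + 1] := by
      exact PySem.List.pyRange_one_succ_right (a := 4) (b := (m : Int) + 1) (by omega)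
    push_cast
    rw [hr, List.foldl_append, ih]
    simp only [List.foldl_cons, List.foldl_nil]
    have hmod : PySem.Int.mod ((m : Int) + 1) 2 = (((m + 1) % 2 : Nat) : Int) := by
      have := PySem.Int.mod_natCast (m + 1) 2
      push_cast at this ⊢
      exact this
    have hF := pvF_succ m (by omega)
    by_cases hpar : (m + 1) % 2 = 0
    · have h2 : PySem.Int.mod ((m : Int) + 1) 2 = 0 := by rw [hmod, hpar]; rfl
      simp only [h2, if_true, hF, hpar]
    · have h2 : ¬ PySem.Int.mod ((m : Int) + 1) 2 = 0 := by rw [hmod]; omega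
      simp only [h2, if_false, hF, hpar]

-- iterated (reference) matrix power
def pvIPow : Nat → Int × Int × Int × Int
  | 0 => (1, 0, 0, 1)
  | (e + 1) => pvMatMul (pvIPow e) (-1, 2, -1, 3)

lemma pvMatMul_assoc (x y z : Int × Int × Int × Int) :
    pvMatMul (pvMatMul x y) z = pvMatMul x (pvMatMul y z) := by
  obtain ⟨a, b, c, d⟩ := x; obtain ⟨e, f, g, h⟩ := y; obtain ⟨i, j, k, l⟩ := z
  simp [pvMatMul]; refine ⟨by ring, by ring, by ring, by ring⟩

lemma pvIPow_add (a b : Nat) : pvIPow (a + b) = pvMatMul (pvIPow a) (pvIPow b) := by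
  induction b with
  | zero =>
    obtain ⟨p, q, r, s⟩ := pvIPow a
    simp [pvIPow, pvMatMul]
  | succ b ih => simp [pvIPow, ih, pvMatMul_assoc]

lemma pvMatPow_eq (e : Nat) : pvMatPow e = pvIPow e := by
  induction e using Nat.strong_induction_on with
  | _ e ih =>
    by_cases h0 : e = 0
    · subst h0; simp [pvMatPow, pvIPow]
    · rw [pvMatPow]
      simp only [h0, dite_false]
      have ihh := ih (e / 2) (Nat.div_lt_self (Nat.pos_of_ne_zero h0) (by omega))
      by_cases hp : e % 2 = 0
      · have : e = e / 2 + e / 2 := by omega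
        simp [hp, ihh, ← pvIPow_add, ← this]
      · have : e = (e / 2 + e / 2) + 1 := by omega
        simp only [hp, if_false, ihh, ← pvIPow_add]
        conv_rhs => rw [this]
        simp [pvIPow]

-- matrix-vector application, and its compatibility with pvMatMul
def pvMV (x : Int × Int × Int × Int) (v : Int × Int) : Int × Int :=
  (x.1 * v.1 + x.2.1 * v.2, x.2.2.1 * v.1 + x.2.2.2 * v.2)

lemma pvMV_mul (x y : Int × Int × Int × Int) (v : Int × Int) :
    pvMV (pvMatMul x y) v = pvMV x (pvMV y v) := by
  obtain ⟨a, b, c, d⟩ := x; obtain ⟨e, f, g, h⟩ := y; obtain ⟨p, q⟩ := v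
  simp [pvMV, pvMatMul]; constructor <;> ring

lemma pvIPow_succ_left (e : Nat) :
    pvIPow (e + 1) = pvMatMul (-1, 2, -1, 3) (pvIPow e) := by
  have h := pvIPow_add 1 e
  rw [Nat.add_comm] at h
  rw [h]
  congr 1

lemma pvF_odd (k : Nat) (hk : 1 ≤ k) : pvF (2 * k + 1) = 2 * pvF (2 * k) - pvF (2 * k - 1) := by
  rcases Nat.lt_or_ge k 2 with h | h
  · interval_cases k; decide
  · have hF := pvF_succ (2 * k) (by omega)
    have hp : ¬ (2 * k + 1) % 2 = 0 := by omega
    simpa [hp] using hF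

lemma pvF_even (k : Nat) (hk : 1 ≤ k) : pvF (2 * k + 2) = pvF (2 * k + 1) + pvF (2 * k) := by
  have hF := pvF_succ (2 * k + 1) (by omega)
  have hp : (2 * k + 1 + 1) % 2 = 0 := by omega
  have h1 : 2 * k + 1 - 1 = 2 * k := by omega
  simpa [hp, h1] using hF

-- the matrix power applied to (1,2) gives (pvF (2k-1), pvF (2k))
lemma pvIPow_vec (k : Nat) (hk : 1 ≤ k) :
    pvMV (pvIPow (k - 1)) (1, 2) = (pvF (2 * k - 1), pvF (2 * k)) := by
  induction k with
  | zero => omega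
  | succ k ih =>
    by_cases hk0 : k = 0
    · subst hk0; decide
    · have h1 : 1 ≤ k := Nat.pos_of_ne_zero hk0
      have ihv := ih h1
      have hs : k + 1 - 1 = (k - 1) + 1 := by omega
      rw [hs, pvIPow_succ_left, pvMV_mul, ihv]
      have e1 : 2 * (k + 1) - 1 = 2 * k + 1 := by omega
      have e2 : 2 * (k + 1) = 2 * k + 2 := by omega
      rw [e1, e2, pvF_odd k h1, pvF_even k h1, pvF_odd k h1]
      simp [pvMV]; constructor <;> ring

-- ===== VERDICT (by name: the statement is the Claim_ definition above) =====
theorem layup_sequence_spec : Claim_equal_layup_sequence := by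
  intro n _
  unfold Spec_layup_sequence layup_sequence layup_sequence_alt
  by_cases h0 : n ≤ 0
  · simp [h0]
  · by_cases h3 : n ≤ 3
    · simp [h0, h3]
    · simp only [h0, h3, if_false]
      obtain ⟨K, rfl⟩ : ∃ K : Nat, n = (K : Int) :=
        ⟨n.toNat, (Int.toNat_of_nonneg (by omega)).symm⟩
      have hK : 4 ≤ K := by exact_mod_cast (by omega : (4 : Int) ≤ (K : Int))
      rw [loopA K hK]
      have hfd : PySem.Int.floordiv (K : Int) 2 = ((K / 2 : Nat) : Int) :=
        PySem.Int.floordiv_natCast K 2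
      have hk2 : 1 ≤ K / 2 := by omega
      have htn : (PySem.Int.floordiv (K : Int) 2 - 1).toNat = K / 2 - 1 := by
        rw [hfd]; omega
      rw [htn, pvMatPow_eq]
      have hvec := pvIPow_vec (K / 2) hk2
      have hmod : PySem.Int.mod (K : Int) 2 = ((K % 2 : Nat) : Int) :=
        PySem.Int.mod_natCast K 2
      set P := pvIPow (K / 2 - 1) with hP
      have ha : P.1 * 1 + P.2.1 * 2 = pvF (2 * (K / 2) - 1) := by
        have := congrArg Prod.fst hvec; simpa [pvMV] using this
      have hb : P.2.2.1 * 1 + P.2.2.2 * 2 = pvF (2 * (K / 2)) := by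
        have := congrArg Prod.snd hvec; simpa [pvMV] using this
      by_cases hpar : K % 2 = 0
      · have h2 : PySem.Int.mod (K : Int) 2 = 0 := by rw [hmod, hpar]; rfl
        have hKe : 2 * (K / 2) = K := by omega
        simp only [h2, if_true, hb, hKe]
      · have h2 : ¬ PySem.Int.mod (K : Int) 2 = 0 := by rw [hmod]; omega
        have hKo : K = 2 * (K / 2) + 1 := by omega
        simp only [h2, if_false, ha, hb]
        rw [← pvF_odd (K / 2) hk2, ← hKo]
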